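-- pv_equiv track=rewrite | github.com/tarpuh/10_all | 2_lesson/2_B.py | kelemsubsets
-- ===== SOURCE A (Python) =====
-- def kelemsubsets(L, m):
--     k = len(L)
--     M = list()
--     A = list()
--     a = 1
--     while a != 2 ** k:
--         M = list()
--         for i in range(0, len(bin(a)) - 1):
--             if bin(a)[-i] == '1':
--                 M.append(L[i - 1])
--         if len(M) == m:
--             A.append(M)
--         a += 1
--
--     return A
-- ===== SOURCE B (Python) =====
-- # Binomial (Pascal) recursion: subsets of size m in mask order are the size-m subsets of
-- # L[:-1] followed by the size-(m-1) subsets of L[:-1] each extended by L[-1].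
-- # Intended difference: for m == 0 this returns [[]] (the one empty subset), where A returns [].
-- def kelemsubsets(L, m):
--     if m < 0 or m > len(L):
--         return []
--     if m == 0:
--         return [[]]
--     return kelemsubsets(L[:-1], m) + [c + [L[-1]] for c in kelemsubsets(L[:-1], m - 1)]
-- ===== Notes on version B (the rewrite author's own statement) =====
-- stated objective: faster
-- what changed: Replaces the exhaustive scan of all 2^k bitmasks (decoding each via its bin() string) with the Pascal/binomial recursion that builds only the C(k,m) subsets directly in the same mask (colex) order.
-- intended difference: For m == 0, A returns [] because its mask loop starts at 1 and never sees the empty mask, while B returns [[]] (the one size-0 subset), which is the intended answer. — e.g. on kelemsubsets([7], 0): A returns [], B returns [[]]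
import Mathlib
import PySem

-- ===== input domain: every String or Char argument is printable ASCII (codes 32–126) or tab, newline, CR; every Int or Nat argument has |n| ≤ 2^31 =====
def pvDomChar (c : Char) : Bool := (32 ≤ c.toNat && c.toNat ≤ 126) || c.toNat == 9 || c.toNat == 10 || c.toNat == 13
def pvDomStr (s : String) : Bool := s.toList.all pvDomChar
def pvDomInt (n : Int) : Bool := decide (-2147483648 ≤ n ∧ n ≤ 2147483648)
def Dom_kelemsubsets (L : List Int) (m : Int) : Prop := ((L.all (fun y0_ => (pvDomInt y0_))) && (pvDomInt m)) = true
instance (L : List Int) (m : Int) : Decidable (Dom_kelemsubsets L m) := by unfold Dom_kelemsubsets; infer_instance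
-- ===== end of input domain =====

-- B replaces A's scan of all 2^k bitmasks by the Pascal/binomial recursion producing only the
-- C(k,m) subsets in the same mask order (objective: faster); for m = 0 B returns [[]] where A
-- returns [] — stated as the intended difference D_ below.

-- ===== PORT A =====

-- Python's bin(n) digit part for n ≥ 1 (most-significant digit first); bin is a builtin.
def pvBinDigits (n : Nat) : List Char :=
  if h : n = 0 then [] else pvBinDigits (n / 2) ++ [if n % 2 = 1 then '1' else '0']
decreasing_by exact Nat.div_lt_self (Nat.pos_of_ne_zero h) (by omega)

-- Python bin(a) as a character list (exact for every int a; A only calls it with a ≥ 1).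
def pvBin (a : Int) : List Char :=
  (if a < 0 then ['-'] else []) ++ ['0', 'b'] ++
    (if a = 0 then ['0'] else pvBinDigits a.natAbs)

-- the inner 'for i in range(0, len(bin(a)) - 1)' loop building M
def pvInnerA (a : Int) (L : List Int) : List Int :=
  (PySem.List.pyRange 0 (((pvBin a).length : Int) - 1) 1).foldl
    (fun M i =>
      if PySem.List.pyGet? (pvBin a) (-i) = some '1'
      then M ++ [(PySem.List.pyGet? L (i - 1)).getD 0]  -- L[i-1] is in range whenever the guard holds
      else M) []

-- the 'while a != 2 ** k' loop; it runs exactly 2^k - 1 times (a = 1, …, 2^k - 1)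
def pvLoopA (L : List Int) (m : Int) : Nat → Int → List (List Int) → List (List Int)
  | 0, _, A => A
  | fuel + 1, a, A =>
      pvLoopA L m fuel (a + 1)
        (if ((pvInnerA a L).length : Int) = m then A ++ [pvInnerA a L] else A)

def kelemsubsets (L : List Int) (m : Int) : List (List Int) :=
  pvLoopA L m (2 ^ L.length - 1) 1 []

-- ===== PORT B =====

def kelemsubsets_alt (L : List Int) (m : Int) : List (List Int) :=
  if h1 : m < 0 ∨ (L.length : Int) < m then []
  else if h2 : m = 0 then [[]]
  else
    kelemsubsets_alt (PySem.List.slice L none (some (-1))) m ++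
      (kelemsubsets_alt (PySem.List.slice L none (some (-1))) (m - 1)).map
        (fun c => c ++ [(PySem.List.pyGet? L (-1)).getD 0])  -- L ≠ [] here (1 ≤ m ≤ len L), so L[-1] is in range
termination_by L.length
decreasing_by
  all_goals
    simp only [PySem.List.slice_to_neg_one, List.length_dropLast]
    push_neg at h1
    omega

-- ===== PRECONDITION & SPEC =====

-- For m == 0, A returns [] (its mask loop starts at 1, so the empty mask is never produced),
-- while B returns [[]], the one size-0 subset, which is the intended answer.
def D_kelemsubsets (L : List Int) (m : Int) : Prop := m = 0
instance (L : List Int) (m : Int) : Decidable (D_kelemsubsets L m) := by unfold D_kelemsubsets; infer_instance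

def Spec_kelemsubsets (L : List Int) (m : Int) (out : List (List Int)) : Prop :=
  ¬ D_kelemsubsets L m → out = kelemsubsets_alt L m
instance (L : List Int) (m : Int) (out : List (List Int)) : Decidable (Spec_kelemsubsets L m out) := by
  unfold Spec_kelemsubsets; infer_instance

def pvDiffWitness_kelemsubsets : List Int × Int := ([7], 0)
def pvDiffWitnessOut_kelemsubsets : (List (List Int)) × (List (List Int)) := ([], [[]])

-- ===== CLAIM (what is proved, stated in full; the proofs are below) =====
def Claim_unchanged_kelemsubsets : Prop :=
  ∀ (L : List Int) (m : Int), Dom_kelemsubsets L m → Spec_kelemsubsets L m (kelemsubsets L m)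
def Claim_changed_kelemsubsets : Prop :=
  Dom_kelemsubsets (pvDiffWitness_kelemsubsets.1) (pvDiffWitness_kelemsubsets.2) ∧
  D_kelemsubsets (pvDiffWitness_kelemsubsets.1) (pvDiffWitness_kelemsubsets.2) ∧
  kelemsubsets (pvDiffWitness_kelemsubsets.1) (pvDiffWitness_kelemsubsets.2) = pvDiffWitnessOut_kelemsubsets.1 ∧
  kelemsubsets_alt (pvDiffWitness_kelemsubsets.1) (pvDiffWitness_kelemsubsets.2) = pvDiffWitnessOut_kelemsubsets.2 ∧
  pvDiffWitnessOut_kelemsubsets.1 ≠ pvDiffWitnessOut_kelemsubsets.2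
def Claim_exact_kelemsubsets : Prop :=
  ∀ (L : List Int) (m : Int), Dom_kelemsubsets L m → D_kelemsubsets L m →
    kelemsubsets L m ≠ kelemsubsets_alt L m

-- ===== LEMMAS AND PROOFS =====

-- decode a L = the sublist of L selected by the set bits of a (bit j ↦ L[j]), little-endian
def decode : Nat → List Int → List Int
  | _, [] => []
  | n, y :: ys => (if n % 2 = 1 then [y] else []) ++ decode (n / 2) ys

-- the common value: all masks 0 … 2^k-1 decoded, filtered to length m
def Fm (L : List Int) (m : Int) : List (List Int) :=
  ((List.range (2 ^ L.length)).map (fun a => decode a L)).filter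
    (fun M => decide ((M.length : Int) = m))

theorem decode_zero (L : List Int) : decode 0 L = [] := by
  induction L with
  | nil => rfl
  | cons y ys ih => simp [decode, ih]

theorem decode_length_le (n : Nat) (L : List Int) : (decode n L).length ≤ L.length := by
  induction L generalizing n with
  | nil => simp [decode]
  | cons y ys ih =>
      simp only [decode, List.length_append, List.length_cons]
      have := ih (n / 2)
      split <;> simp <;> omega

theorem decode_eq_nil_iff (L : List Int) (n : Nat) (h : n < 2 ^ L.length) :
    decode n L = [] ↔ n = 0 := by
  induction L generalizing n with
  | nil =>
      simp only [List.length_nil, pow_zero] at h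
      have : n = 0 := by omega
      subst this; simp [decode]
  | cons y ys ih =>
      have h2 : n / 2 < 2 ^ ys.length := by
        simp only [List.length_cons, pow_succ] at h; omega
      simp only [decode, List.append_eq_nil_iff, ih _ h2]
      constructor
      · rintro ⟨h1, h2⟩
        split at h1 <;> simp_all <;> omega
      · rintro rfl; simp

theorem decode_two_pow_add (L : List Int) (b : Nat) (hb : b < 2 ^ L.length) :
    decode (2 ^ L.length + b) L = decode b L := by
  induction L generalizing b with
  | nil =>
      simp only [List.length_nil, pow_zero] at hb ⊢
      interval_cases b
      rfl
  | cons y ys ih =>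
      have hlen : (y :: ys).length = ys.length + 1 := rfl
      rw [hlen] at hb ⊢
      have hmod : (2 ^ (ys.length + 1) + b) % 2 = b % 2 := by
        have : 2 ^ (ys.length + 1) % 2 = 0 := by simp [pow_succ]
        omega
      have hdiv : (2 ^ (ys.length + 1) + b) / 2 = 2 ^ ys.length + b / 2 := by
        rw [pow_succ]; omega
      have hb2 : b / 2 < 2 ^ ys.length := by
        rw [pow_succ] at hb; omega
      simp only [decode, hmod, hdiv, ih _ hb2]

theorem decode_append (L : List Int) (x : Int) (n : Nat) :
    decode n (L ++ [x]) = decode n L ++ (if (n / 2 ^ L.length) % 2 = 1 then [x] else []) := by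
  induction L generalizing n with
  | nil => simp [decode]
  | cons y ys ih =>
      have h2 : n / 2 / 2 ^ ys.length = n / 2 ^ (ys.length + 1) := by
        rw [Nat.div_div_eq_div_mul, pow_succ, Nat.mul_comm]
      simp only [List.cons_append, decode, ih (n / 2), List.length_cons, List.append_assoc, h2]
      rfl

theorem decode_testBit (L : List Int) (n : Nat) :
    decode n L = ((List.range L.length).filter (fun j => n.testBit j)).map (fun j => L.getD j 0) := by
  induction L generalizing n with
  | nil => simp [decode]
  | cons y ys ih =>
      have hs : ∀ j, n.testBit (j + 1) = (n / 2).testBit j := fun j => Nat.testBit_add_one n j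
      rcases Nat.mod_two_eq_zero_or_one n with hpar | hpar
      · have h0 : n.testBit 0 = false := by simp [Nat.testBit_zero, hpar]
        simp [decode, ih, h0, hpar, List.range_succ_eq_map, List.filter_cons, List.filter_map,
          Function.comp_def, hs, Nat.succ_eq_add_one]
      · have h0 : n.testBit 0 = true := by simp [Nat.testBit_zero, hpar]
        simp [decode, ih, h0, hpar, List.range_succ_eq_map, List.filter_cons, List.filter_map,
          Function.comp_def, hs, Nat.succ_eq_add_one]

theorem pvBinDigits_lt (n : Nat) : n < 2 ^ (pvBinDigits n).length := by
  induction n using Nat.strong_induction_on with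
  | _ n ih =>
    rw [pvBinDigits]
    split
    · next h => subst h; simp
    · next h =>
        have := ih (n / 2) (Nat.div_lt_self (Nat.pos_of_ne_zero h) (by omega))
        simp only [List.length_append, List.length_singleton, pow_succ]
        omega

theorem pvBinDigits_length_le (k : Nat) : ∀ n, n < 2 ^ k → (pvBinDigits n).length ≤ k := by
  induction k with
  | zero =>
      intro n h
      simp only [pow_zero] at h
      interval_cases n
      rw [pvBinDigits]; simp
  | succ k ih =>
      intro n h
      rw [pvBinDigits]
      split
      · simp
      · next hn =>
          have := ih (n / 2) (by rw [pow_succ] at h; omega)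
          simp only [List.length_append, List.length_singleton]
          omega

theorem pvBinDigits_rev (n : Nat) : ∀ j, j < (pvBinDigits n).length →
    (pvBinDigits n).reverse[j]? = some (if n.testBit j then '1' else '0') := by
  induction n using Nat.strong_induction_on with
  | _ n ih =>
    intro j hj
    rw [pvBinDigits] at hj ⊢
    by_cases hn : n = 0
    · rw [dif_pos hn] at hj; simp at hj
    · rw [dif_neg hn] at hj ⊢
      simp only [List.reverse_append, List.reverse_singleton, List.singleton_append]
      match j with
      | 0 =>
          rw [List.getElem?_cons_zero, Nat.testBit_zero]
          rcases Nat.mod_two_eq_zero_or_one n with h | h <;> simp [h]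
      | j + 1 =>
          rw [List.getElem?_cons_succ, Nat.testBit_add_one]
          have hj' : j < (pvBinDigits (n / 2)).length := by
            simp only [List.length_append, List.length_singleton] at hj; omega
          exact ih (n / 2) (Nat.div_lt_self (Nat.pos_of_ne_zero hn) (by omega)) j hj'

-- the inner loop computes decode
theorem pvInnerA_eq (s : Nat) (L : List Int) (hs : s < 2 ^ L.length) :
    pvInnerA (s : Int) L = decode s L := by
  unfold pvInnerA
  rw [PySem.List.foldl_append_ite]
  simp only [List.nil_append]
  rcases Nat.eq_zero_or_pos s with rfl | hpos
  · have h1 : ((pvBin ((0 : Nat) : Int)).length : Int) - 1 = 2 := by decide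
    rw [h1]
    have h2 : (PySem.List.pyRange 0 2 1).filter
        (fun i => decide (PySem.List.pyGet? (pvBin ((0 : Nat) : Int)) (-i) = some '1')) = [] := by
      decide
    rw [h2]
    simp [decode_zero]
  · have hnz : s ≠ 0 := by omega
    have hbin : pvBin (s : Int) = '0' :: 'b' :: pvBinDigits s := by
      have h1 : ¬ ((s : Int) < 0) := by omega
      have h2 : ¬ ((s : Int) = 0) := by exact_mod_cast hnz
      simp [pvBin, h1, h2, hnz]
    rw [hbin]
    have hlen : ((('0' :: 'b' :: pvBinDigits s).length : Nat) : Int) - 1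
        = (((pvBinDigits s).length + 1 : Nat) : Int) := by
      simp only [List.length_cons]; push_cast; ring
    rw [hlen, PySem.List.pyRange_zero_natCast]
    rw [List.filter_map, List.map_map]
    rw [List.range_succ_eq_map, List.filter_cons]
    simp only [Function.comp_def, Nat.succ_eq_add_one, Nat.cast_zero, neg_zero]
    rw [if_neg (by simp [PySem.List.pyGet?_zero_cons])]
    rw [List.filter_map, List.map_map]
    simp only [Function.comp_def, Nat.succ_eq_add_one]
    have hfc : ∀ j ∈ List.range (pvBinDigits s).length,
        decide (PySem.List.pyGet? ('0' :: 'b' :: pvBinDigits s) (-((j + 1 : Nat) : Int)) = some '1')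
          = s.testBit j := by
      intro j hj
      have hj1 : j < (pvBinDigits s).length := List.mem_range.mp hj
      rw [PySem.List.pyGet?_neg_natCast ('0' :: 'b' :: pvBinDigits s) (j + 1) (by omega)
        (by simp only [List.length_cons]; omega)]
      have hidx : ('0' :: 'b' :: pvBinDigits s).length - (j + 1)
          = (((pvBinDigits s).length - 1 - j) + 1) + 1 := by
        simp only [List.length_cons]; omega
      rw [hidx, List.getElem?_cons_succ, List.getElem?_cons_succ]
      rw [← List.getElem?_reverse hj1, pvBinDigits_rev s j hj1]
      cases hb : s.testBit j <;> simp [hb]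
    rw [List.filter_congr hfc]
    have hmap : ∀ j ∈ (List.range (pvBinDigits s).length).filter (fun j => s.testBit j),
        (PySem.List.pyGet? L (((j + 1 : Nat) : Int) - 1)).getD 0 = L.getD j 0 := by
      intro j _
      have hc : ((j + 1 : Nat) : Int) - 1 = (j : Int) := by push_cast; ring
      rw [hc, PySem.List.pyGet?_natCast, List.getD_eq_getElem?_getD]
    rw [List.map_congr_left hmap]
    rw [decode_testBit]
    have hnbk : (pvBinDigits s).length ≤ L.length := pvBinDigits_length_le L.length s hs
    rw [show L.length = (pvBinDigits s).length + (L.length - (pvBinDigits s).length) by omega,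
      List.range_add, List.filter_append, List.map_append]
    have h2 : (((List.range (L.length - (pvBinDigits s).length)).map
        (fun t => (pvBinDigits s).length + t)).filter (fun j => s.testBit j)) = [] := by
      rw [List.filter_eq_nil_iff]
      intro j hj
      simp only [List.mem_map] at hj
      obtain ⟨t, _, rfl⟩ := hj
      have hlt : s < 2 ^ ((pvBinDigits s).length + t) :=
        lt_of_lt_of_le (pvBinDigits_lt s) (Nat.pow_le_pow_right (by omega) (by omega))
      simp [Nat.testBit_lt_two_pow hlt]
    rw [h2]
    simp

-- the while loop collects the decodes of a = s, …, s + fuel - 1 of the right length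
theorem pvLoopA_eq (L : List Int) (m : Int) :
    ∀ (fuel s : Nat) (A : List (List Int)), s + fuel ≤ 2 ^ L.length →
      pvLoopA L m fuel (s : Int) A =
        A ++ ((List.range fuel).map (fun t => decode (s + t) L)).filter
          (fun M => decide ((M.length : Int) = m)) := by
  intro fuel
  induction fuel with
  | zero => intro s A h; simp [pvLoopA]
  | succ fuel ih =>
      intro s A h
      rw [pvLoopA]
      have hs : s < 2 ^ L.length := by omega
      rw [pvInnerA_eq s L hs]
      have hcast : (s : Int) + 1 = ((s + 1 : Nat) : Int) := by push_cast; ring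
      rw [hcast, ih (s + 1) _ (by omega)]
      rw [List.range_succ_eq_map]
      simp only [List.map_cons, List.map_map, List.filter_cons, Function.comp_def,
        Nat.add_zero, Nat.succ_eq_add_one]
      have hfun : (fun t => decode (s + 1 + t) L) = (fun t => decode (s + (t + 1)) L) := by
        funext t; congr 1; omega
      rw [hfun]
      by_cases hc : ((decode s L).length : Int) = m
      · simp [hc, List.append_assoc]
      · simp [hc]

theorem A_eq_Fm (L : List Int) (m : Int) (hm : m ≠ 0) : kelemsubsets L m = Fm L m := by
  have hpos : 0 < 2 ^ L.length := Nat.two_pow_pos L.length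
  unfold kelemsubsets Fm
  rw [show (1 : Int) = ((1 : Nat) : Int) by norm_num]
  rw [pvLoopA_eq L m (2 ^ L.length - 1) 1 [] (by omega)]
  rw [show List.range (2 ^ L.length) = List.range (1 + (2 ^ L.length - 1)) by congr 1; omega,
    List.range_add]
  simp only [List.range_one, List.map_cons, List.map_nil, List.singleton_append, List.map_map,
    List.filter_cons, Function.comp_def, decode_zero, List.length_nil, Nat.cast_zero,
    List.nil_append]
  rw [if_neg (by simpa using fun h => hm h.symm)]

theorem Fm_nil (m : Int) : Fm [] m = if m = 0 then [[]] else [] := by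
  by_cases h : m = 0 <;>
    simp [Fm, List.range_one, decode, h, eq_comm]

theorem Fm_zero (L : List Int) : Fm L 0 = [[]] := by
  have hpos : 0 < 2 ^ L.length := Nat.two_pow_pos L.length
  unfold Fm
  rw [List.filter_map]
  have h2 : ∀ a ∈ List.range (2 ^ L.length),
      ((fun M : List Int => decide ((M.length : Int) = 0)) ∘ (fun a => decode a L)) a
        = decide (a = 0) := by
    intro a ha
    have ha' := List.mem_range.mp ha
    have hnil := decode_eq_nil_iff L a ha'
    simp only [Function.comp_def]
    rw [decide_eq_decide, Int.natCast_eq_zero, List.length_eq_zero_iff, hnil]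
  rw [List.filter_congr h2]
  have h3 : (List.range (2 ^ L.length)).filter (fun a => decide (a = 0)) = [0] := by
    rw [show 2 ^ L.length = 1 + (2 ^ L.length - 1) by omega, List.range_add, List.filter_append,
      List.filter_map]
    simp [List.range_one]
  rw [h3]
  simp [decode_zero]

theorem Fm_big (L : List Int) (m : Int) (h : m < 0 ∨ (L.length : Int) < m) : Fm L m = [] := by
  unfold Fm
  rw [List.filter_eq_nil_iff]
  intro M hM
  simp only [List.mem_map] at hM
  obtain ⟨a, _, rfl⟩ := hM
  have := decode_length_le a L
  simp only [decide_eq_true_eq]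
  omega

theorem Fm_append (L : List Int) (x : Int) (m : Int) :
    Fm (L ++ [x]) m = Fm L m ++ (Fm L (m - 1)).map (fun c => c ++ [x]) := by
  unfold Fm
  simp only [List.length_append, List.length_cons, List.length_nil, Nat.zero_add]
  have hpow : 2 ^ (L.length + 1) = 2 ^ L.length + 2 ^ L.length := by
    rw [pow_succ]; omega
  rw [hpow, List.range_add, List.map_append, List.filter_append]
  congr 1
  · have hcg : ∀ a ∈ List.range (2 ^ L.length), decode a (L ++ [x]) = decode a L := by
      intro a ha
      rw [decode_append, Nat.div_eq_of_lt (List.mem_range.mp ha)]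
      simp
    exact congrArg _ (List.map_congr_left hcg)
  · rw [List.map_map]
    have hcg : ∀ b ∈ List.range (2 ^ L.length),
        ((fun a => decode a (L ++ [x])) ∘ (fun t => 2 ^ L.length + t)) b
          = ((fun c : List Int => c ++ [x]) ∘ (fun b => decode b L)) b := by
      intro b hb
      have hb' := List.mem_range.mp hb
      simp only [Function.comp_def]
      rw [decode_append, decode_two_pow_add L b hb']
      have hdiv : (2 ^ L.length + b) / 2 ^ L.length = 1 := by
        rw [Nat.add_comm, Nat.add_div_right _ (Nat.two_pow_pos L.length),
          Nat.div_eq_of_lt hb']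
      rw [hdiv]
      simp
    rw [List.map_congr_left hcg]
    rw [← List.map_map, List.filter_map]
    have hfc : ∀ M ∈ (List.range (2 ^ L.length)).map (fun b => decode b L),
        ((fun M : List Int => decide ((M.length : Int) = m)) ∘ (fun c : List Int => c ++ [x])) M
          = decide ((M.length : Int) = m - 1) := by
      intro M _
      simp only [Function.comp_def, List.length_append, List.length_cons, List.length_nil,
        Nat.zero_add]
      rw [decide_eq_decide]
      push_cast
      omega
    rw [List.filter_congr hfc]

theorem B_eq_Fm (L : List Int) (m : Int) : kelemsubsets_alt L m = Fm L m := by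
  induction L using List.reverseRecOn generalizing m with
  | nil =>
      rw [kelemsubsets_alt]
      by_cases h1 : m < 0 ∨ ((List.length ([] : List Int) : Int) < m)
      · rw [dif_pos h1, Fm_nil]
        have : m ≠ 0 := by simp at h1; omega
        simp [this]
      · rw [dif_neg h1]
        have h2 : m = 0 := by simp at h1; omega
        rw [dif_pos h2, h2, Fm_nil]
        simp
  | append_singleton L' x ih =>
      rw [kelemsubsets_alt]
      by_cases h1 : m < 0 ∨ (((L' ++ [x]).length : Int) < m)
      · rw [dif_pos h1, Fm_big _ _ h1]
      · rw [dif_neg h1]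
        by_cases h2 : m = 0
        · rw [dif_pos h2, h2, Fm_zero]
        · rw [dif_neg h2]
          simp only [PySem.List.slice_to_neg_one, List.dropLast_concat,
            PySem.List.pyGet?_neg_one_append_singleton, Option.getD_some]
          rw [ih, ih, Fm_append]

theorem A_zero (L : List Int) : kelemsubsets L 0 = [] := by
  have hpos : 0 < 2 ^ L.length := Nat.two_pow_pos L.length
  unfold kelemsubsets
  rw [show (1 : Int) = ((1 : Nat) : Int) by norm_num]
  rw [pvLoopA_eq L 0 (2 ^ L.length - 1) 1 [] (by omega)]
  simp only [List.nil_append]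
  rw [List.filter_eq_nil_iff]
  intro M hM
  simp only [List.mem_map, List.mem_range] at hM
  obtain ⟨t, ht, rfl⟩ := hM
  have h1 : 1 + t < 2 ^ L.length := by omega
  have h2 : decode (1 + t) L ≠ [] := by
    rw [Ne, decode_eq_nil_iff L _ h1]
    omega
  simp only [decide_eq_true_eq]
  intro hc
  apply h2
  rw [← List.length_eq_zero_iff]
  omega

-- ===== VERDICT (by name: the statement is the Claim_ definition above) =====
theorem kelemsubsets_spec : Claim_unchanged_kelemsubsets := by
  intro L m _
  unfold Spec_kelemsubsets D_kelemsubsets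
  intro hD
  rw [A_eq_Fm L m hD, B_eq_Fm]

theorem kelemsubsets_changed : Claim_changed_kelemsubsets := by
  unfold Claim_changed_kelemsubsets
  refine ⟨by decide, by decide, ?_, ?_, by decide⟩
  · show kelemsubsets [7] 0 = []
    exact A_zero [7]
  · show kelemsubsets_alt [7] 0 = [[]]
    rw [B_eq_Fm, Fm_zero]

theorem kelemsubsets_tight : Claim_exact_kelemsubsets := by
  intro L m _ hD
  unfold D_kelemsubsets at hD
  subst hD
  rw [A_zero, B_eq_Fm, Fm_zero]
  simp
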